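-- pv_equiv track=rewrite | github.com/huge3286/job | theory/Codefun/oppo/08262.py | solve
-- ===== SOURCE A (Python) =====
-- def solve(line):
--     n = len(line)
--     ans = 0
--     res = 1
--     for i in range(1, n):
--         if line[i] != line[i - 1]:
--             ans += res * (res - 1)
--             res = 1
--         else:
--             res += 1
--
--     return ans + res * (res - 1)
-- ===== SOURCE B (Python) =====
-- def solve(line):
--     # count, for every window length d >= 1, the windows of d adjacent equal
--     # pairs that are all True, by repeatedly AND-shrinking the adjacency list;
--     # the answer is twice the total number of such windows.
--     eq = [a == b for a, b in zip(line, line[1:])]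
--     cur, s, total = eq, eq[1:], 0
--     while any(cur):
--         total += sum(cur)
--         cur = [c and e for c, e in zip(cur, s)]
--         s = s[1:]
--     return 2 * total
-- ===== Notes on version B (the rewrite author's own statement) =====
-- stated objective: alternative
-- what changed: B counts, per window length d, the all-equal windows of d adjacent pairs by repeatedly AND-shrinking the adjacency boolean list, and returns twice the total; A scans once with a run counter reset at mismatches and sums L*(L-1) per run.
import Mathlib
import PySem

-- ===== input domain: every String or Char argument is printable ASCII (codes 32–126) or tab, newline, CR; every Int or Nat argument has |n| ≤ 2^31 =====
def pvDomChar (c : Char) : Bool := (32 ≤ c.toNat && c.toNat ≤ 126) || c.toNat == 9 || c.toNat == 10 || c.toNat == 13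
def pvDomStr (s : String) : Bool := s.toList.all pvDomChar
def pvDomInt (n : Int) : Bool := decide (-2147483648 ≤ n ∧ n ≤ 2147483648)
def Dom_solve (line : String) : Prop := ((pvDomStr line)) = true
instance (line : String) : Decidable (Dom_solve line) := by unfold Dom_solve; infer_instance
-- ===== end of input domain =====

-- B counts, for each window length d, the all-true windows of d adjacent-equal
-- pairs by repeatedly AND-shrinking the adjacency boolean list and doubles the
-- total; A makes one pass with a run counter. Alternative algorithm, same result.

-- ===== PORT A =====
-- A's loop compares line[i] with line[i-1] for i = 1..n-1, carrying (ans, res);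
-- ported as structural recursion carrying the previous character.
def solveLoop (ans res : Int) (prev : Char) : List Char → Int
  | [] => ans + res * (res - 1)
  | c :: cs =>
    if c ≠ prev then solveLoop (ans + res * (res - 1)) 1 c cs
    else solveLoop ans (res + 1) c cs

def solve (line : String) : Int :=
  match line.toList with
  | [] => 0 + 1 * (1 - 1)      -- loop body never runs: ans = 0, res = 1
  | c :: cs => solveLoop 0 1 c cs

-- ===== PORT B =====
-- eq = [a == b for a, b in zip(line, line[1:])]
def eqList (l : List Char) : List Bool := List.zipWith (fun a b => decide (a = b)) l l.tail

-- while any(cur): total += sum(cur); cur = [c and e for c, e in zip(cur, s)]; s = s[1:]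
-- (sum of a Python bool list counts its True entries, ported as .count true)
def bGo (cur s : List Bool) (total : Int) : Int :=
  if cur.any id then
    bGo (List.zipWith (· && ·) cur s) s.tail (total + (cur.count true : Int))
  else total
termination_by cur.length + s.length
decreasing_by
  rename_i h
  obtain ⟨b, hb, _⟩ := List.any_eq_true.mp h
  have hcur : 0 < cur.length := List.length_pos_of_mem hb
  simp only [List.length_zipWith, List.length_tail]
  omega

def solve_alt (line : String) : Int :=
  let eq := eqList line.toList
  2 * bGo eq (eq.tail) 0

-- ===== PRECONDITION & SPEC =====
def Spec_solve (line : String) (out : Int) : Prop := out = solve_alt line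
instance (line : String) (out : Int) : Decidable (Spec_solve line out) := by unfold Spec_solve; infer_instance

-- ===== CLAIM (what is proved, stated in full; the proofs are below) =====
def Claim_equal_solve : Prop := ∀ (line : String), Dom_solve line → Spec_solve line (solve line)

-- ===== LEMMAS AND PROOFS =====

def rlen (E : List Bool) (i : Nat) : Nat := ((E.drop i).takeWhile id).length

lemma takeWhile_le_len (l : List Bool) : (l.takeWhile id).length ≤ l.length := by
  induction l with
  | nil => simp
  | cons b r ih => cases b <;> simp [List.takeWhile] <;> omega

lemma takeWhile_succ_le_iff : ∀ (l : List Bool) (d : Nat) (hd : d < l.length),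
    (d + 1 ≤ (l.takeWhile id).length ↔ d ≤ (l.takeWhile id).length ∧ l[d]'hd = true) := by
  intro l
  induction l with
  | nil => intro d hd; simp at hd
  | cons b r ih =>
    intro d hd
    cases b with
    | false =>
      cases d with
      | zero => simp [List.takeWhile]
      | succ d' => simp [List.takeWhile]
    | true =>
      cases d with
      | zero => simp [List.takeWhile]
      | succ d' =>
        have hd' : d' < r.length := by simpa using hd
        have h2 := ih d' hd'
        have h3 := takeWhile_le_len r
        simp only [List.takeWhile_cons, id, if_true, List.length_cons, List.getElem_cons_succ]
        constructor
        · intro h; exact ⟨by omega, (h2.mp (by omega)).2⟩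
        · rintro ⟨h4, h5⟩
          have := h2.mpr ⟨by omega, h5⟩
          omega

lemma rlen_le (E : List Bool) (i : Nat) : rlen E i ≤ E.length - i := by
  have h1 := takeWhile_le_len (E.drop i)
  simpa [rlen] using h1

lemma rlen_succ_iff (E : List Bool) (i d : Nat) (h : i + d < E.length) :
    (d + 1 ≤ rlen E i ↔ d ≤ rlen E i ∧ E[i + d]'h = true) := by
  have hd : d < (E.drop i).length := by simp; omega
  have := takeWhile_succ_le_iff (E.drop i) d hd
  simpa [rlen, List.getElem_drop] using this

def wd (E : List Bool) (d : Nat) : List Bool :=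
  (List.range (E.length + 1 - d)).map (fun i => decide (d ≤ rlen E i))

lemma wd_one (E : List Bool) : wd E 1 = E := by
  apply List.ext_getElem
  · simp [wd]
  · intro i h1 h2
    simp only [wd, List.length_range] at h1
    simp only [wd, List.getElem_map, List.getElem_range]
    have hi : i + 0 < E.length := by omega
    have h3 := rlen_succ_iff E i 0 hi
    simp only [Nat.zero_add, Nat.zero_le, true_and, Nat.add_zero] at h3
    cases hE : E[i]'h2 with
    | true => simp [h3, hE]
    | false =>
      have : ¬ (1 ≤ rlen E i) := by rw [h3, hE]; simp
      simp [this]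

lemma wd_step (E : List Bool) (d : Nat) :
    List.zipWith (· && ·) (wd E d) (E.drop d) = wd E (d + 1) := by
  apply List.ext_getElem
  · simp [wd]; omega
  · intro i h1 h2
    simp only [List.length_zipWith, wd, List.length_range, List.length_drop] at h1
    simp only [List.getElem_zipWith, wd, List.getElem_map, List.getElem_range,
      List.getElem_drop]
    have hi : i + d < E.length := by omega
    have h3 := rlen_succ_iff E i d hi
    have hcomm : d + i = i + d := Nat.add_comm d i
    by_cases h4 : d ≤ rlen E i
    · cases hE : E[i + d]'hi with
      | true =>
        have h5 : d + 1 ≤ rlen E i := h3.mpr ⟨h4, hE⟩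
        simp [h4, h5, hcomm, hE]
      | false =>
        have h5 : ¬ (d + 1 ≤ rlen E i) := fun h => by
          have ht := (h3.mp h).2
          exact absurd (hE.symm.trans ht) (by decide)
        simp [h4, h5, hcomm, hE]
    · have h5 : ¬ (d + 1 ≤ rlen E i) := by omega
      simp [h4, h5]

def sumW (E : List Bool) (d : Nat) : Nat :=
  if d ≤ E.length then (wd E d).count true + sumW E (d + 1) else 0
termination_by E.length + 1 - d

lemma true_mem_wd_iff (E : List Bool) (d : Nat) :
    true ∈ wd E d ↔ ∃ i, i < E.length + 1 - d ∧ d ≤ rlen E i := by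
  simp [wd, List.mem_map, List.mem_range]

lemma any_wd_iff (E : List Bool) (d : Nat) :
    (wd E d).any id = true ↔ true ∈ wd E d := by
  simp [List.any_eq_true]

lemma count_wd_zero (E : List Bool) (d k : Nat) (hdk : d ≤ k)
    (h : (wd E d).any id = false) : (wd E k).count true = 0 := by
  rw [List.count_eq_zero]
  intro hmem
  obtain ⟨i, hi, hk⟩ := (true_mem_wd_iff E k).mp hmem
  have : true ∈ wd E d := (true_mem_wd_iff E d).mpr ⟨i, by omega, by omega⟩
  rw [← any_wd_iff] at this
  simp [h] at this

lemma sumW_zero (E : List Bool) : ∀ n d, E.length + 1 - d ≤ n →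
    (∀ k, d ≤ k → (wd E k).count true = 0) → sumW E d = 0 := by
  intro n
  induction n with
  | zero =>
    intro d hn hz
    have hd : ¬ d ≤ E.length := by omega
    rw [sumW, if_neg hd]
  | succ m ih =>
    intro d hn hz
    rw [sumW]
    by_cases h : d ≤ E.length
    · have h6 := ih (d+1) (by omega) (fun k hk => hz k (by omega))
      simp [h, hz d le_rfl, h6]
    · simp [h]

lemma bGo_unroll (E : List Bool) : ∀ n d total, E.length + 1 - d ≤ n →
    bGo (wd E d) (E.drop d) total = total + (sumW E d : Int) := by
  intro n
  induction n with
  | zero =>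
    intro d total hn
    have hd : ¬ d ≤ E.length := by omega
    have hw : wd E d = [] := by
      have : E.length + 1 - d = 0 := by omega
      simp [wd, this]
    rw [bGo, sumW, if_neg hd, hw]
    simp
  | succ m ih =>
    intro d total hn
    rw [bGo]
    by_cases h : (wd E d).any id
    · have hd : d ≤ E.length := by
        by_contra hc
        have : E.length + 1 - d = 0 := by omega
        obtain ⟨b, hb, _⟩ := List.any_eq_true.mp h
        simp [wd, this] at hb
      rw [if_pos h, wd_step, List.tail_drop]
      rw [ih (d + 1) (total + ((wd E d).count true : Int)) (by omega)]
      conv_rhs => rw [sumW, if_pos hd]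
      push_cast
      ring
    · rw [if_neg h]
      have hz : sumW E d = 0 :=
        sumW_zero E (E.length + 1 - d) d le_rfl
          (fun k hk => count_wd_zero E d k hk (by simpa using h))
      rw [hz]
      simp

lemma count_map_range (p : Nat → Prop) [DecidablePred p] (n : Nat) :
    ((List.range n).map (fun i => decide (p i))).count true
      = ((Finset.range n).filter p).card := by
  induction n with
  | zero => simp
  | succ k ih =>
    rw [List.range_succ]
    by_cases hp : p k
    · simp [List.count_append, Finset.range_add_one, Finset.filter_insert, hp, ih,
        Finset.card_insert_of_notMem, List.count_singleton]
    · simp [List.count_append, Finset.range_add_one, Finset.filter_insert, hp, ih,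
        List.count_singleton]

lemma count_wd_card (E : List Bool) (d : Nat) :
    (wd E d).count true = ((Finset.range (E.length + 1 - d)).filter (fun i => d ≤ rlen E i)).card := by
  simpa [wd] using count_map_range (fun i => d ≤ rlen E i) (E.length + 1 - d)

lemma Icc_insert (d n : Nat) (h : d ≤ n) :
    Finset.Icc d n = insert d (Finset.Icc (d + 1) n) := by
  ext x; simp; omega

lemma sumW_eq_sum (E : List Bool) : ∀ n d, E.length + 1 - d ≤ n →
    sumW E d = ∑ k ∈ Finset.Icc d E.length, (wd E k).count true := by
  intro n
  induction n with
  | zero =>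
    intro d hn
    have hd : ¬ d ≤ E.length := by omega
    rw [sumW, if_neg hd]
    rw [Finset.Icc_eq_empty (by omega)]
    simp
  | succ m ih =>
    intro d hn
    rw [sumW]
    by_cases hd : d ≤ E.length
    · rw [if_pos hd, ih (d + 1) (by omega), Icc_insert d E.length hd,
        Finset.sum_insert (by simp)]
    · rw [if_neg hd, Finset.Icc_eq_empty (by omega)]
      simp

lemma filter_range_shrink (E : List Bool) (k : Nat) (hk : 1 ≤ k) :
    (Finset.range (E.length + 1 - k)).filter (fun i => k ≤ rlen E i)
      = (Finset.range E.length).filter (fun i => k ≤ rlen E i) := by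
  ext i
  simp only [Finset.mem_filter, Finset.mem_range]
  constructor
  · rintro ⟨h1, h2⟩; exact ⟨by omega, h2⟩
  · rintro ⟨h1, h2⟩
    have := rlen_le E i
    exact ⟨by omega, h2⟩

lemma sum_indicator_Icc (n r : Nat) (hr : r ≤ n) :
    (∑ k ∈ Finset.Icc 1 n, if k ≤ r then 1 else 0) = r := by
  rw [← Finset.card_filter]
  have h : (Finset.Icc 1 n).filter (fun k => k ≤ r) = Finset.Icc 1 r := by
    ext x; simp; omega
  rw [h, Nat.card_Icc]; omega

lemma sumW_one (E : List Bool) :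
    sumW E 1 = ∑ i ∈ Finset.range E.length, rlen E i := by
  rw [sumW_eq_sum E (E.length + 1 - 1) 1 le_rfl]
  have h1 : ∀ k ∈ Finset.Icc 1 E.length,
      (wd E k).count true
        = ∑ i ∈ Finset.range E.length, if k ≤ rlen E i then 1 else 0 := by
    intro k hk
    simp only [Finset.mem_Icc] at hk
    rw [count_wd_card, filter_range_shrink E k hk.1, Finset.card_filter]
  rw [Finset.sum_congr rfl h1, Finset.sum_comm]
  apply Finset.sum_congr rfl
  intro i hi
  simp only [Finset.mem_range] at hi
  have h2 : rlen E i ≤ E.length := le_trans (rlen_le E i) (by omega)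
  exact sum_indicator_Icc E.length (rlen E i) h2

def gRec : List Bool → Nat
  | [] => 0
  | b :: r => ((b :: r).takeWhile id).length + gRec r

lemma sum_rlen_eq_gRec (E : List Bool) :
    (∑ i ∈ Finset.range E.length, rlen E i) = gRec E := by
  induction E with
  | nil => simp [gRec]
  | cons b r ih =>
    rw [List.length_cons, Finset.sum_range_succ']
    have h : ∀ i, rlen (b :: r) (i + 1) = rlen r i := by
      intro i; simp [rlen]
    simp only [h]
    rw [ih]
    simp only [gRec, rlen, List.drop_zero]
    omega

def altGo : List Char → Int
  | [] => 0
  | c :: cs =>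
    let t := (cs.takeWhile (fun d => d = c)).length
    ((t : Int) + 1) * ((t : Int) + 1 - 1) + altGo (cs.drop t)
termination_by l => l.length
decreasing_by
  simp only [List.length_cons, List.length_drop]
  omega

-- structure of the adjacency list at the head run
lemma eqList_run (c : Char) (cs : List Char) :
    eqList (c :: cs)
      = List.replicate (cs.takeWhile (fun d => d = c)).length true
        ++ (match cs.drop (cs.takeWhile (fun d => d = c)).length with
            | [] => []
            | _ :: _ => false :: eqList (cs.drop (cs.takeWhile (fun d => d = c)).length)) := by
  induction cs generalizing c with
  | nil => simp [eqList]
  | cons c' cs' ih =>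
    by_cases h : c' = c
    · subst h
      have h2 := ih c'
      simp only [List.takeWhile_cons, decide_true, if_true, List.length_cons,
        List.drop_succ_cons, List.replicate_succ]
      rw [show eqList (c' :: c' :: cs') = true :: eqList (c' :: cs') by
        simp [eqList]]
      rw [h2]
      simp
    · have h1 : (c = c') = False := by simp [(Ne.symm h : c ≠ c')]
      have h2 : decide (c' = c) = false := by simp [h]
      simp only [List.takeWhile_cons, h2, Bool.false_eq_true, if_false,
        List.length_nil, List.replicate_zero, List.nil_append, List.drop_zero]
      rw [show eqList (c :: c' :: cs') = false :: eqList (c' :: cs') by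
        simp [eqList, h1]]

lemma takeWhile_replicate_append (t : Nat) (E : List Bool) :
    (List.replicate t true ++ false :: E).takeWhile id = List.replicate t true := by
  induction t with
  | zero => simp [List.takeWhile_cons]
  | succ k ih => simp [List.replicate_succ, List.takeWhile_cons, ih]

lemma gRec_run_boundary (t : Nat) (E : List Bool) :
    2 * gRec (List.replicate t true ++ false :: E) = t * (t + 1) + 2 * gRec E := by
  induction t with
  | zero => simp [gRec]
  | succ k ih =>
    rw [List.replicate_succ, List.cons_append]
    rw [show gRec (true :: (List.replicate k true ++ false :: E))
        = ((true :: (List.replicate k true ++ false :: E)).takeWhile id).length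
          + gRec (List.replicate k true ++ false :: E) from rfl]
    have h1 : (true :: (List.replicate k true ++ false :: E)).takeWhile id
        = true :: List.replicate k true := by
      simp [List.takeWhile_cons, takeWhile_replicate_append]
    rw [h1, Nat.mul_add, ih]
    simp only [List.length_cons, List.length_replicate]
    ring

lemma gRec_replicate (t : Nat) :
    2 * gRec (List.replicate t true) = t * (t + 1) := by
  induction t with
  | zero => simp [gRec]
  | succ k ih =>
    rw [List.replicate_succ]
    rw [show gRec (true :: List.replicate k true)
        = ((true :: List.replicate k true).takeWhile id).length
          + gRec (List.replicate k true) from rfl]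
    have h1 : (true :: List.replicate k true).takeWhile id = true :: List.replicate k true := by
      simp [List.takeWhile_cons, List.takeWhile_replicate]
    rw [h1, Nat.mul_add, ih]
    simp only [List.length_cons, List.length_replicate]
    ring

lemma altGo_cons (c : Char) (cs : List Char) :
    altGo (c :: cs) =
      (((cs.takeWhile (fun d => d = c)).length : Int) + 1) *
        (((cs.takeWhile (fun d => d = c)).length : Int) + 1 - 1) +
      altGo (cs.drop (cs.takeWhile (fun d => d = c)).length) := by
  rw [altGo.eq_def]

lemma altGo_eq_gRec : ∀ (n : Nat) (l : List Char), l.length ≤ n →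
    altGo l = 2 * (gRec (eqList l) : Int) := by
  intro n
  induction n with
  | zero =>
    intro l hl
    have : l = [] := by cases l; rfl; simp at hl
    subst this
    simp [altGo, eqList, gRec]
  | succ m ih =>
    intro l hl
    cases l with
    | nil => simp [altGo, eqList, gRec]
    | cons c cs =>
      rw [altGo_cons, eqList_run]
      cases hr : cs.drop (cs.takeWhile (fun d => d = c)).length with
      | nil =>
        have h1 := gRec_replicate (cs.takeWhile (fun d => d = c)).length
        zify at h1
        simp only [altGo, List.append_nil]
        push_cast
        ring_nf
        ring_nf at h1
        linarith
      | cons x xs =>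
        have hlen : (x :: xs).length ≤ m := by
          have h2 : (cs.drop (cs.takeWhile (fun d => d = c)).length).length
              = cs.length - (cs.takeWhile (fun d => d = c)).length := List.length_drop
          rw [hr] at h2
          simp only [List.length_cons] at hl h2 ⊢
          omega
        have h3 := ih (x :: xs) hlen
        have h1 := gRec_run_boundary (cs.takeWhile (fun d => d = c)).length (eqList (x :: xs))
        zify at h1
        rw [h3]
        push_cast
        ring_nf
        ring_nf at h1
        linarith

lemma solveLoop_eq (l : List Char) : ∀ (ans res : Int) (prev : Char),
    solveLoop ans res prev l =
      ans + (res + ((l.takeWhile (fun d => d = prev)).length : Int)) *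
            (res + ((l.takeWhile (fun d => d = prev)).length : Int) - 1) +
        altGo (l.drop (l.takeWhile (fun d => d = prev)).length) := by
  induction l with
  | nil => intro ans res prev; simp [solveLoop, altGo]
  | cons c cs ih =>
    intro ans res prev
    by_cases h : c = prev
    · subst h
      simp only [solveLoop, ne_eq, not_true_eq_false, if_false, List.takeWhile_cons,
        decide_true, if_true, List.length_cons, List.drop_succ_cons]
      rw [ih ans (res + 1) c]
      push_cast
      ring_nf
    · simp only [solveLoop, ne_eq, h, not_false_eq_true, if_true, List.takeWhile_cons,
        decide_eq_true_eq, if_false, List.length_nil, Nat.cast_zero, add_zero,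
        List.drop_zero]
      rw [ih (ans + res * (res - 1)) 1 c]
      rw [altGo_cons]
      ring_nf

lemma solve_alt_eq (line : String) : solve_alt line = 2 * (gRec (eqList line.toList) : Int) := by
  show 2 * bGo (eqList line.toList) (eqList line.toList).tail 0 = _
  have h1 : (eqList line.toList).tail = (eqList line.toList).drop 1 :=
    List.drop_one.symm
  have h2 := bGo_unroll (eqList line.toList) ((eqList line.toList).length) 1 0 (by omega)
  rw [wd_one] at h2
  rw [h1, h2, sumW_one, sum_rlen_eq_gRec]
  simp

theorem solve_eq (line : String) : solve line = solve_alt line := by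
  rw [solve_alt_eq]
  unfold solve
  cases h : line.toList with
  | nil => show (0 + 1 * (1 - 1) : Int) = _; simp [eqList, gRec]
  | cons c cs =>
    show solveLoop 0 1 c cs = 2 * (gRec (eqList (c :: cs)) : Int)
    rw [show solveLoop 0 1 c cs = altGo (c :: cs) by
      rw [solveLoop_eq cs 0 1 c, altGo_cons]; ring_nf]
    exact altGo_eq_gRec (c :: cs).length (c :: cs) le_rfl

-- ===== VERDICT =====
theorem solve_spec : Claim_equal_solve := by
  intro line _
  unfold Spec_solve
  exact solve_eq line
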